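-- pv_equiv track=rewrite | github.com/cbrianhill/adventofcode | 2021/day18.py | needs_split
-- ===== SOURCE A (Python) =====
-- def needs_split(value):
--     consec_ints = 0
--     for i in range(0, len(value)):
--         if value[i] >= '0' and value[i] <= '9':
--             consec_ints += 1
--         else:
--             consec_ints = 0
--         if consec_ints > 1:
--             return i - 1
--     return -1
-- ===== SOURCE B (Python) =====
-- def needs_split(value):
--     # Stage 1: group the input into maximal runs of digit characters,
--     # recording (start index, length) for each run.
--     runs = []
--     i = 0
--     n = len(value)
--     while i < n:
--         if '0' <= value[i] <= '9':
--             j = i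
--             while j < n and '0' <= value[j] <= '9':
--                 j += 1
--             runs.append((i, j - i))
--             i = j
--         else:
--             i += 1
--     # Stage 2: the first run of length >= 2 starts at the answer.
--     for start, length in runs:
--         if length >= 2:
--             return start
--     return -1
-- ===== Notes on version B (the rewrite author's own statement) =====
-- stated objective: alternative
-- what changed: B works in two stages: it first groups the string into maximal digit runs as (start, length) pairs, then returns the start of the first run of length >= 2, instead of A's single pass with a resetting consecutive-digit counter.
import Mathlib
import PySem

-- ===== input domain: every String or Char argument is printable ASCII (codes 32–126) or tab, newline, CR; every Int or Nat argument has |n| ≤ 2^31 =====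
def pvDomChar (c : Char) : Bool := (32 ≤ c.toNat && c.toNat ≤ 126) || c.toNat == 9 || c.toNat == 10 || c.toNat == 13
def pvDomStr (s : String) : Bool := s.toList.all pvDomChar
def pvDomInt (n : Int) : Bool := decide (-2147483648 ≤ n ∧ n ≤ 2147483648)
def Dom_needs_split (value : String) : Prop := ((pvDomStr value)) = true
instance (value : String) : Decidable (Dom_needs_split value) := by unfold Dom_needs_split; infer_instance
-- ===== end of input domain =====

-- B replaces A's one-pass resetting counter by two stages: group maximal digit runs, then pick the first run of length ≥ 2 (alternative decomposition, same cost).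

-- ===== PORT A =====
-- A's loop over indices with the consec_ints accumulator, as structural recursion over the chars.
def needsSplitGoA (cs : List Char) (i : Int) (consec : Nat) : Int :=
  match cs with
  | [] => -1
  | c :: rest =>
    let consec' := if '0' ≤ c ∧ c ≤ '9' then consec + 1 else 0
    if consec' > 1 then i - 1 else needsSplitGoA rest (i + 1) consec'

def needs_split (value : String) : Int := needsSplitGoA value.toList 0 0

-- ===== PORT B =====
-- inner while loop of stage 1: length of the leading digit run
def leadCount : List Char → Nat
  | [] => 0
  | c :: rest => if '0' ≤ c ∧ c ≤ '9' then leadCount rest + 1 else 0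

-- stage 1 (outer while loop): list of (start, length) of maximal digit runs
def runsGo (cs : List Char) (i : Int) : List (Int × Int) :=
  match cs with
  | [] => []
  | c :: rest =>
    if '0' ≤ c ∧ c ≤ '9' then
      let k := leadCount rest
      (i, (k : Int) + 1) :: runsGo (rest.drop k) (i + (k : Int) + 1)
    else runsGo rest (i + 1)
termination_by cs.length
decreasing_by all_goals simp [List.length_drop]

-- stage 2: start of the first run of length ≥ 2
def firstLong : List (Int × Int) → Int
  | [] => -1
  | (s, l) :: rest => if l ≥ 2 then s else firstLong rest

def needs_split_alt (value : String) : Int := firstLong (runsGo value.toList 0)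

-- ===== PRECONDITION & SPEC =====
def Spec_needs_split (value : String) (out : Int) : Prop := out = needs_split_alt value
instance (value : String) (out : Int) : Decidable (Spec_needs_split value out) := by unfold Spec_needs_split; infer_instance

-- ===== CLAIM (what is proved, stated in full; the proofs are below) =====
def Claim_equal_needs_split : Prop := ∀ (value : String), Dom_needs_split value → Spec_needs_split value (needs_split value)

-- ===== LEMMAS AND PROOFS =====
theorem needsSplit_eq (cs : List Char) : ∀ i : Int, needsSplitGoA cs i 0 = firstLong (runsGo cs i) := by
  induction cs with
  | nil => intro i; simp [needsSplitGoA, runsGo, firstLong]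
  | cons c rest ih =>
    intro i
    by_cases hc : '0' ≤ c ∧ c ≤ '9'
    · cases rest with
      | nil =>
        simp [needsSplitGoA, runsGo, leadCount, firstLong, hc]
      | cons d rest' =>
        by_cases hd : '0' ≤ d ∧ d ≤ '9'
        · -- both digits: A returns i after two steps; B's first run has length ≥ 2
          have hA : needsSplitGoA (c :: d :: rest') i 0 = i := by
            simp [needsSplitGoA, hc, hd]
          have hB : firstLong (runsGo (c :: d :: rest') i) = i := by
            rw [runsGo]
            simp only [hc, and_self, if_true]
            have hk : leadCount (d :: rest') = leadCount rest' + 1 := by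
              simp [leadCount, hd]
            simp [firstLong, hk]
          rw [hA, hB]
        · -- digit then non-digit: run of length 1, both sides continue on d :: rest'
          have hk : leadCount (d :: rest') = 0 := by simp [leadCount, hd]
          have hB : firstLong (runsGo (c :: d :: rest') i)
              = firstLong (runsGo (d :: rest') (i + 1)) := by
            rw [runsGo]
            simp [hc, hk, firstLong]
          have hA : needsSplitGoA (c :: d :: rest') i 0
              = needsSplitGoA (d :: rest') (i + 1) 0 := by
            simp [needsSplitGoA, hc, hd]
          rw [hA, hB, ih]
    · have hA : needsSplitGoA (c :: rest) i 0 = needsSplitGoA rest (i + 1) 0 := by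
        simp [needsSplitGoA, hc]
      have hB : firstLong (runsGo (c :: rest) i) = firstLong (runsGo rest (i + 1)) := by
        rw [runsGo]; simp [hc]
      rw [hA, hB, ih]

-- ===== VERDICT (by name: the statement is the Claim_ definition above) =====
theorem needs_split_spec : Claim_equal_needs_split := by
  intro value _
  unfold Spec_needs_split needs_split needs_split_alt
  exact needsSplit_eq value.toList 0
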